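-- pv_equiv track=rewrite | github.com/ebuz/advent_of_code_2019 | day_10/Solution.py | analyze_map
-- ===== SOURCE A (Python) =====
-- def analyze_map(asteroid_map):
--     width = asteroid_map.index('\n')
--     height = asteroid_map.strip().count('\n') + 1
--     asteroid_coords = []
--     for y,line in enumerate(asteroid_map.strip().split('\n')):
--         for x,c in enumerate(line.rstrip('.')):
--             if c == '#':
--                 asteroid_coords.append((x,y))
--     return width, height, asteroid_coords
-- ===== SOURCE B (Python) =====
-- def analyze_map(asteroid_map):
--     width = asteroid_map.index('\n')
--     stripped = asteroid_map.strip()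
--     height = stripped.count('\n') + 1
--     newlines = [i for i, c in enumerate(stripped) if c == '\n']
--     hashes = [i for i, c in enumerate(stripped) if c == '#']
--     coords = []
--     k = 0           # how many newlines lie before the current hash
--     line_start = 0  # absolute index where the current line begins
--     for j in hashes:
--         while k < len(newlines) and newlines[k] < j:
--             line_start = newlines[k] + 1
--             k += 1
--         coords.append((j - line_start, k))
--     return width, height, coords
-- ===== Notes on version B (the rewrite author's own statement) =====
-- stated objective: alternative
-- what changed: Instead of A's nested enumerate-over-split-lines scan (with per-line rstrip), B builds flat index lists of '#' and '\n' positions in the stripped string and converts each hash index to (x, y) by a two-pointer merge against the newline positions (x = index - line start, y = newlines passed); width and height keep A's exact expressions, so the no-newline ValueError is unchanged (excluded by Pre_).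
import Mathlib
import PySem

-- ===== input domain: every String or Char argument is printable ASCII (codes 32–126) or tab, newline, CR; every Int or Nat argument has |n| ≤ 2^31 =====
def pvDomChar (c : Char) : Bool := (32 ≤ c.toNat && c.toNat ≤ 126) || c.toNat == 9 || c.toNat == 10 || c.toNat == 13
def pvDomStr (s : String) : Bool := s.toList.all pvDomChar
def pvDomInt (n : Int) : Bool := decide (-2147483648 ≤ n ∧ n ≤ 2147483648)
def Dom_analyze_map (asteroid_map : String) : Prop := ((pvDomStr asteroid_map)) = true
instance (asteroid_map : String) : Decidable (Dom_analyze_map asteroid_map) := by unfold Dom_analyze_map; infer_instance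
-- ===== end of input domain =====

-- B replaces A's nested enumerate-over-split-lines scan by flat index lists of '#' and '\n'
-- positions merged two-pointer style into coordinates (objective: alternative).

-- ===== PORT A =====
-- line.rstrip('.') ported by hand (exact: drops trailing '.' characters)
def rstripDots (cs : List Char) : List Char := (cs.reverse.dropWhile (· == '.')).reverse

def analyze_map (asteroid_map : String) : Int × Int × (List (Int × Int)) :=
  let width : Int := PySem.Str.find asteroid_map "\n"   -- .index: Pre_ excludes the ValueError case
  let stripped : List Char := PySem.Chars.strip asteroid_map.toList
  let height : Int := (PySem.Chars.count stripped ['\n'] : Int) + 1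
  let coords : List (Int × Int) :=
    (PySem.List.enumerate (PySem.Chars.splitOn stripped ['\n']) 0).foldl
      (fun acc p =>
        (PySem.List.enumerate (rstripDots p.2) 0).foldl
          (fun acc2 q => if q.2 == '#' then acc2 ++ [(q.1, p.1)] else acc2) acc)
      []
  (width, height, coords)

-- ===== PORT B =====
-- [i for i, c in enumerate(stripped) if c == t]
def idxList (cs : List Char) (t : Char) : List Int :=
  (PySem.List.enumerate cs 0).foldl (fun acc p => if p.2 == t then acc ++ [p.1] else acc) []

-- the inner while loop: skip newlines before j, tracking (remaining newlines, k, line_start)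
def pvAdvance : List Int → Int → Int → Int → List Int × Int × Int
  | [], k, ls, _ => ([], k, ls)
  | n :: ns, k, ls, j => if n < j then pvAdvance ns (k + 1) (n + 1) j else (n :: ns, k, ls)

-- the for loop over hash indices (accumulator = coords)
def pvConvert : List Int → List Int → Int → Int → List (Int × Int) → List (Int × Int)
  | [], _, _, _, acc => acc
  | j :: hs, ns, k, ls, acc =>
    let r := pvAdvance ns k ls j
    pvConvert hs r.1 r.2.1 r.2.2 (acc ++ [(j - r.2.2, r.2.1)])

def analyze_map_alt (asteroid_map : String) : Int × Int × (List (Int × Int)) :=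
  let width : Int := PySem.Str.find asteroid_map "\n"
  let stripped : List Char := PySem.Chars.strip asteroid_map.toList
  let height : Int := (PySem.Chars.count stripped ['\n'] : Int) + 1
  let newlines := idxList stripped '\n'
  let hashes := idxList stripped '#'
  (width, height, pvConvert hashes newlines 0 0 [])

-- ===== PRECONDITION & SPEC =====
-- Pre_ excludes exactly the inputs with no '\n', where asteroid_map.index('\n') raises ValueError.
def Pre_analyze_map (asteroid_map : String) : Prop := PySem.Str.isIn "\n" asteroid_map = true
instance (asteroid_map : String) : Decidable (Pre_analyze_map asteroid_map) := by
  unfold Pre_analyze_map; infer_instance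
def pvWitness_analyze_map : String := ".#\n#."

def Spec_analyze_map (asteroid_map : String) (out : Int × Int × (List (Int × Int))) : Prop := out = analyze_map_alt asteroid_map
instance (asteroid_map : String) (out : Int × Int × (List (Int × Int))) : Decidable (Spec_analyze_map asteroid_map out) := by unfold Spec_analyze_map; infer_instance

-- ===== CLAIM (what is proved, stated in full; the proofs are below) =====
def Claim_equal_analyze_map : Prop := ∀ (asteroid_map : String), Dom_analyze_map asteroid_map → Pre_analyze_map asteroid_map → Spec_analyze_map asteroid_map (analyze_map asteroid_map)

-- ===== LEMMAS AND PROOFS =====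

-- split on '\n': (first line, remaining lines), structurally
def splitNl : List Char → List Char × List (List Char)
  | [] => ([], [])
  | c :: r =>
    if c = '\n' then ([], (splitNl r).1 :: (splitNl r).2)
    else (c :: (splitNl r).1, (splitNl r).2)

-- '#' coordinates of one line, x starting at k
def innerFrom : List Char → Int → Int → List (Int × Int)
  | [], _, _ => []
  | c :: r, k, y => if c = '#' then (k, y) :: innerFrom r (k + 1) y else innerFrom r (k + 1) y

def coordsLines : Int → List (List Char) → List (Int × Int)
  | _, [] => []
  | y, l :: ls => innerFrom l 0 y ++ coordsLines (y + 1) ls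

-- flat reference scan
def coordsTail : List Char → Int → Int → List (Int × Int)
  | [], _, _ => []
  | c :: r, x, y =>
    if c = '\n' then coordsTail r 0 (y + 1)
    else if c = '#' then (x, y) :: coordsTail r (x + 1) y
    else coordsTail r (x + 1) y

-- structural version of idxList
def idxFrom (t : Char) : List Char → Int → List Int
  | [], _ => []
  | c :: r, k => if c = t then k :: idxFrom t r (k + 1) else idxFrom t r (k + 1)

-- pvConvert without accumulator
def convertF : List Int → List Int → Int → Int → List (Int × Int)
  | [], _, _, _ => []
  | j :: hs, ns, k, ls =>
    let r := pvAdvance ns k ls j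
    (j - r.2.2, r.2.1) :: convertF hs r.1 r.2.1 r.2.2

theorem splitOn_go_eq (sfuel : Nat) : ∀ (l cur : List Char) (acc : List (List Char)),
    l.length ≤ sfuel →
    PySem.Chars.splitOn.go ['\n'] sfuel l cur acc
      = acc.reverse ++ (cur.reverse ++ (splitNl l).1) :: (splitNl l).2 := by
  induction sfuel with
  | zero =>
    intro l cur acc h
    have : l = [] := List.eq_nil_of_length_eq_zero (Nat.le_zero.mp h)
    subst this
    simp [PySem.Chars.splitOn.go, splitNl]
  | succ f ih =>
    intro l cur acc h
    match l with
    | [] => simp [PySem.Chars.splitOn.go, splitNl]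
    | c :: r =>
      by_cases hc : c = '\n'
      · subst hc
        have hp : List.isPrefixOf ['\n'] ('\n' :: r) = true := by
          simp [List.isPrefixOf]
        rw [PySem.Chars.splitOn.go]
        simp only [hp, if_true]
        rw [show List.drop ['\n'].length ('\n' :: r) = r from rfl]
        rw [ih r [] (cur.reverse :: acc) (by simpa using Nat.le_of_succ_le_succ h)]
        simp [splitNl]
      · have hp : List.isPrefixOf ['\n'] (c :: r) = false := by
          simp [List.isPrefixOf]
          intro hh; exact absurd hh.symm hc
        rw [PySem.Chars.splitOn.go]
        simp only [hp, Bool.false_eq_true, if_false]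
        rw [ih r (c :: cur) acc (by simpa using Nat.le_of_succ_le_succ h)]
        simp [splitNl, hc]

theorem splitOn_eq (cs : List Char) :
    PySem.Chars.splitOn cs ['\n'] = (splitNl cs).1 :: (splitNl cs).2 := by
  unfold PySem.Chars.splitOn
  rw [splitOn_go_eq (cs.length + 1) cs [] [] (Nat.le_succ _)]
  simp

theorem inner_foldl_eq (cs : List Char) : ∀ (k y : Int) (acc : List (Int × Int)),
    (PySem.List.enumerate cs k).foldl
      (fun acc2 q => if q.2 == '#' then acc2 ++ [(q.1, y)] else acc2) acc
      = acc ++ innerFrom cs k y := by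
  induction cs with
  | nil => intro k y acc; simp [PySem.List.enumerate_nil, innerFrom]
  | cons c r ih =>
    intro k y acc
    rw [PySem.List.enumerate_cons, List.foldl_cons]
    by_cases h : c = '#'
    · simp only [h, beq_self_eq_true, if_true]
      rw [ih]; simp [innerFrom]
    · have hb : (c == '#') = false := by simp [h]
      simp only [hb, Bool.false_eq_true, if_false]
      rw [ih]; simp [innerFrom, h]

theorem innerFrom_append (t d : List Char) : ∀ (k y : Int),
    innerFrom (t ++ d) k y = innerFrom t k y ++ innerFrom d (k + t.length) y := by
  induction t with
  | nil => intro k y; simp [innerFrom]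
  | cons c r ih =>
    intro k y
    by_cases h : c = '#' <;>
      simp [innerFrom, h, ih, add_comm, add_left_comm]

theorem innerFrom_no_hash (d : List Char) (hd : ∀ c ∈ d, c ≠ '#') :
    ∀ (k y : Int), innerFrom d k y = [] := by
  induction d with
  | nil => intro k y; rfl
  | cons c r ih =>
    intro k y
    have hc : c ≠ '#' := hd c (by simp)
    simp [innerFrom, hc, ih (fun c h => hd c (by simp [h]))]

theorem innerFrom_rstripDots (l : List Char) (k y : Int) :
    innerFrom (rstripDots l) k y = innerFrom l k y := by
  have hsplit : l = rstripDots l ++ (l.reverse.takeWhile (· == '.')).reverse := by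
    unfold rstripDots
    conv_lhs => rw [← l.reverse_reverse,
      ← List.takeWhile_append_dropWhile (p := (· == '.')) (l := l.reverse)]
    rw [List.reverse_append]
  conv_rhs => rw [hsplit]
  rw [innerFrom_append]
  have : innerFrom ((l.reverse.takeWhile (· == '.')).reverse) (k + (rstripDots l).length) y = [] := by
    apply innerFrom_no_hash
    intro c hc
    have := List.mem_takeWhile_imp (List.mem_reverse.mp hc)
    simp at this; simp [this]
  simp [this]

theorem outer_foldl_eq (ls : List (List Char)) : ∀ (k : Int) (acc : List (Int × Int)),
    (PySem.List.enumerate ls k).foldl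
      (fun acc p =>
        (PySem.List.enumerate (rstripDots p.2) 0).foldl
          (fun acc2 q => if q.2 == '#' then acc2 ++ [(q.1, p.1)] else acc2) acc) acc
      = acc ++ coordsLines k ls := by
  induction ls with
  | nil => intro k acc; simp [PySem.List.enumerate_nil, coordsLines]
  | cons l ls ih =>
    intro k acc
    rw [PySem.List.enumerate_cons]
    simp only [List.foldl_cons]
    rw [inner_foldl_eq, innerFrom_rstripDots, ih]
    simp [coordsLines]

theorem coordsTail_eq_lines (cs : List Char) : ∀ (x y : Int),
    coordsTail cs x y = innerFrom (splitNl cs).1 x y ++ coordsLines (y + 1) (splitNl cs).2 := by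
  induction cs with
  | nil => intro x y; simp [coordsTail, splitNl, innerFrom, coordsLines]
  | cons c r ih =>
    intro x y
    by_cases h : c = '\n'
    · subst h
      simp [coordsTail, splitNl, innerFrom, coordsLines, ih]
    · by_cases h2 : c = '#' <;> simp [coordsTail, splitNl, innerFrom, h, h2, ih]

-- B-side lemmas

theorem idxList_foldl_eq (t : Char) (cs : List Char) : ∀ (k : Int) (acc : List Int),
    (PySem.List.enumerate cs k).foldl (fun acc p => if p.2 == t then acc ++ [p.1] else acc) acc
      = acc ++ idxFrom t cs k := by
  induction cs with
  | nil => intro k acc; simp [PySem.List.enumerate_nil, idxFrom]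
  | cons c r ih =>
    intro k acc
    rw [PySem.List.enumerate_cons, List.foldl_cons]
    by_cases h : c = t
    · simp only [h, beq_self_eq_true, if_true]
      rw [ih]; simp [idxFrom]
    · have hb : (c == t) = false := by simp [h]
      simp only [hb, Bool.false_eq_true, if_false]
      rw [ih]; simp [idxFrom, h]

theorem idxList_eq (t : Char) (cs : List Char) : idxList cs t = idxFrom t cs 0 := by
  unfold idxList
  rw [idxList_foldl_eq]; simp

theorem idxFrom_ge (t : Char) (cs : List Char) : ∀ (k : Int), ∀ j ∈ idxFrom t cs k, k ≤ j := by
  induction cs with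
  | nil => intro k j hj; simp [idxFrom] at hj
  | cons c r ih =>
    intro k j hj
    by_cases h : c = t
    · simp [idxFrom, h] at hj
      rcases hj with hj | hj
      · omega
      · have := ih (k + 1) j hj; omega
    · simp [idxFrom, h] at hj
      have := ih (k + 1) j hj; omega

theorem pvConvert_eq (hs : List Int) : ∀ (ns : List Int) (k ls : Int) (acc : List (Int × Int)),
    pvConvert hs ns k ls acc = acc ++ convertF hs ns k ls := by
  induction hs with
  | nil => intro ns k ls acc; simp [pvConvert, convertF]
  | cons j hs ih =>
    intro ns k ls acc
    simp [pvConvert, convertF, ih]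

theorem pvAdvance_id (ns : List Int) (k ls j : Int) (h : ∀ n ∈ ns, ¬ n < j) :
    pvAdvance ns k ls j = (ns, k, ls) := by
  cases ns with
  | nil => rfl
  | cons n ns =>
    have : ¬ n < j := h n (by simp)
    simp [pvAdvance, this]

theorem convertF_skip_nl (hs : List Int) (ns : List Int) (k ls n : Int)
    (h : ∀ j ∈ hs, n < j) :
    convertF hs (n :: ns) k ls = convertF hs ns (k + 1) (n + 1) := by
  cases hs with
  | nil => rfl
  | cons j hs =>
    have : n < j := h j (by simp)
    simp [convertF, pvAdvance, this]

theorem convertF_eq_coordsTail (cs : List Char) : ∀ (p x y : Int),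
    convertF (idxFrom '#' cs p) (idxFrom '\n' cs p) y (p - x) = coordsTail cs x y := by
  induction cs with
  | nil => intro p x y; simp [idxFrom, convertF, coordsTail]
  | cons c r ih =>
    intro p x y
    by_cases hnl : c = '\n'
    · subst hnl
      have hne : ('\n' : Char) ≠ '#' := by decide
      rw [show idxFrom '#' ('\n' :: r) p = idxFrom '#' r (p + 1) by simp [idxFrom, hne]]
      rw [show idxFrom '\n' ('\n' :: r) p = p :: idxFrom '\n' r (p + 1) by simp [idxFrom]]
      rw [convertF_skip_nl _ _ y (p - x) p
        (fun j hj => by have := idxFrom_ge '#' r (p + 1) j hj; omega)]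
      have := ih (p + 1) 0 (y + 1)
      rw [show p + 1 - 0 = p + 1 by omega] at this
      rw [this]
      simp [coordsTail]
    · by_cases hh : c = '#'
      · subst hh
        rw [show idxFrom '#' ('#' :: r) p = p :: idxFrom '#' r (p + 1) by simp [idxFrom]]
        rw [show idxFrom '\n' ('#' :: r) p = idxFrom '\n' r (p + 1) by simp [idxFrom]]
        rw [show convertF (p :: idxFrom '#' r (p + 1)) (idxFrom '\n' r (p + 1)) y (p - x)
            = (p - (p - x), y) :: convertF (idxFrom '#' r (p + 1)) (idxFrom '\n' r (p + 1)) y (p - x) by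
          simp [convertF,
            pvAdvance_id _ y (p - x) p
              (fun n hn => by have := idxFrom_ge '\n' r (p + 1) n hn; omega)]]
        have := ih (p + 1) (x + 1) y
        rw [show p + 1 - (x + 1) = p - x by omega] at this
        rw [this]
        rw [show p - (p - x) = x by omega]
        simp [coordsTail, hnl]
      · rw [show idxFrom '#' (c :: r) p = idxFrom '#' r (p + 1) by simp [idxFrom, hh]]
        rw [show idxFrom '\n' (c :: r) p = idxFrom '\n' r (p + 1) by simp [idxFrom, hnl]]
        have := ih (p + 1) (x + 1) y
        rw [show p + 1 - (x + 1) = p - x by omega] at this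
        rw [this]
        simp [coordsTail, hnl, hh]

-- ===== VERDICT (by name: the statement is the Claim_ definition above) =====
theorem analyze_map_spec : Claim_equal_analyze_map := by
  intro s _ _
  unfold Spec_analyze_map analyze_map analyze_map_alt
  simp only
  refine congrArg (Prod.mk _) (congrArg (Prod.mk _) ?_)
  rw [splitOn_eq, outer_foldl_eq]
  rw [idxList_eq, idxList_eq, pvConvert_eq]
  have := convertF_eq_coordsTail (PySem.Chars.strip s.toList) 0 0 0
  rw [show (0 : Int) - 0 = 0 by omega] at this
  rw [this, coordsTail_eq_lines]
  simp [coordsLines]
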